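-- pv_equiv track=rewrite | github.com/RAM1R0-STR/python-practice-exercises | 2do_examen/coprimos.py | coprimos
-- ===== SOURCE A (Python) =====
-- def divisores(n):
--     ldiv = []
--     for i in range(1,n,1):
--         div = n%i
--         if div == 0:
--             ldiv.append(i)
--     return ldiv
--
-- def coprimos(n1,n2):
--     ln1 = divisores(n1)
--     ln2 = divisores(n2)
--     c = 0
--     for elem in ln1:
--         if elem in ln2:
--             c = c +1
--     if c > 1:
--         return False
--     else:
--         return True
-- ===== SOURCE B (Python) =====
-- def coprimos(n1, n2):
--     # One pass: count the divisors shared by both numbers.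
--     shared = 0
--     for d in range(1, min(n1, n2)):
--         if n1 % d == 0 and n2 % d == 0:
--             shared += 1
--     return shared <= 1
-- ===== Notes on version B (the rewrite author's own statement) =====
-- stated objective: faster
-- what changed: B counts the shared divisors in a single loop over range(1, min(n1, n2)) instead of materialising both divisor lists and scanning one for membership of each element of the other.
import Mathlib
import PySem

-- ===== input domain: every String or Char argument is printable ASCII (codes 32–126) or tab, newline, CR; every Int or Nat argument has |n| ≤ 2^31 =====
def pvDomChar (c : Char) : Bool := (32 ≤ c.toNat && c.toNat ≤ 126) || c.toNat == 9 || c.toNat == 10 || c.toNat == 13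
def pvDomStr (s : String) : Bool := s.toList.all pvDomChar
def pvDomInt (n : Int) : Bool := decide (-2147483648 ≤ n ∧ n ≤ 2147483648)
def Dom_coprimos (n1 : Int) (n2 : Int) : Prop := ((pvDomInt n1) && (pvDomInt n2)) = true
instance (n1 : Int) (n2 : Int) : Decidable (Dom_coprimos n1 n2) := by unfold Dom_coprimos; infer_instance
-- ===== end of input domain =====

-- B counts the shared divisors in one pass over range(1, min(n1, n2)) instead of building
-- both divisor lists and scanning one for each element of the other (objective: faster).

-- ===== PORT A =====
def divisores (n : Int) : List Int :=
  (PySem.List.pyRange 1 n 1).foldl (fun ldiv i =>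
    let div := PySem.Int.mod n i
    if div == 0 then ldiv ++ [i] else ldiv) []

def coprimos (n1 : Int) (n2 : Int) : Bool :=
  let ln1 := divisores n1
  let ln2 := divisores n2
  let c : Int := ln1.foldl (fun c elem => if elem ∈ ln2 then c + 1 else c) 0
  if c > 1 then false else true

-- ===== PORT B =====
def coprimos_alt (n1 : Int) (n2 : Int) : Bool :=
  let shared : Int := (PySem.List.pyRange 1 (min n1 n2) 1).foldl
    (fun shared d => if PySem.Int.mod n1 d == 0 && PySem.Int.mod n2 d == 0 then shared + 1 else shared) 0
  decide (shared ≤ 1)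

-- ===== PRECONDITION & SPEC =====
def Spec_coprimos (n1 : Int) (n2 : Int) (out : Bool) : Prop := out = coprimos_alt n1 n2
instance (n1 : Int) (n2 : Int) (out : Bool) : Decidable (Spec_coprimos n1 n2 out) := by unfold Spec_coprimos; infer_instance

-- ===== CLAIM (what is proved, stated in full; the proofs are below) =====
def Claim_equal_coprimos : Prop := ∀ (n1 : Int) (n2 : Int), Dom_coprimos n1 n2 → Spec_coprimos n1 n2 (coprimos n1 n2)

-- ===== LEMMAS AND PROOFS =====

theorem divisores_eq_filter (n : Int) :
    divisores n = (PySem.List.pyRange 1 n 1).filter (fun i => PySem.Int.mod n i == 0) := by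
  unfold divisores
  exact (PySem.List.foldl_append_if_eq_filter (fun i => PySem.Int.mod n i == 0)
    (l := PySem.List.pyRange 1 n 1) (acc := [])).trans (List.nil_append _)

theorem mem_divisores (n d : Int) :
    d ∈ divisores n ↔ 1 ≤ d ∧ d < n ∧ d ∣ n := by
  rw [divisores_eq_filter]
  simp [List.mem_filter, PySem.List.mem_pyRange_one, PySem.Int.mod_eq_zero_iff_dvd]
  tauto

-- counts over an initial range do not change when the predicate fails above the cut
theorem countP_range_extend (R : Int → Bool) (a b : Int) (h1 : 1 ≤ a) (hab : a ≤ b)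
    (hR : ∀ d, a ≤ d → d < b → R d = false) :
    (PySem.List.pyRange 1 b 1).countP R = (PySem.List.pyRange 1 a 1).countP R := by
  rw [PySem.List.pyRange_one_append 1 a b h1 hab, List.countP_append]
  have : (PySem.List.pyRange a b 1).countP R = 0 := by
    rw [List.countP_eq_zero]
    intro d hd
    rw [PySem.List.mem_pyRange_one] at hd
    simp [hR d hd.1 hd.2]
  omega

theorem count_eq (n1 n2 : Int) :
    (divisores n1).countP (fun e => decide (e ∈ divisores n2))
      = (PySem.List.pyRange 1 (min n1 n2) 1).countP
          (fun d => PySem.Int.mod n1 d == 0 && PySem.Int.mod n2 d == 0) := by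
  rw [divisores_eq_filter n1, List.countP_filter]
  have hpred : ∀ d, 1 ≤ d → d < n1 →
      (decide (d ∈ divisores n2) && (PySem.Int.mod n1 d == 0))
        = ((PySem.Int.mod n1 d == 0) && (PySem.Int.mod n2 d == 0) && decide (d < n2)) := by
    intro d h1 h2
    rw [Bool.eq_iff_iff]
    simp [mem_divisores, PySem.Int.mod_eq_zero_iff_dvd, h1]
    tauto
  by_cases h : n1 ≤ n2
  · -- min = n1; on range(1, n1) the bound d < n2 is automatic
    rw [min_eq_left h]
    apply List.countP_congr
    intro d hd
    rw [PySem.List.mem_pyRange_one] at hd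
    rw [hpred d hd.1 hd.2, decide_eq_true (by omega : d < n2), Bool.and_true]
  · -- min = n2 < n1; past n2 the membership predicate is false, so cut the range at n2
    rw [min_eq_right (by omega : n2 ≤ n1)]
    by_cases h2 : n2 ≤ 1
    · -- both ranges contribute nothing: divisores n2 = [] and range(1, n2) = []
      rw [PySem.List.pyRange_one_eq_nil h2, List.countP_nil, List.countP_eq_zero]
      intro d hd
      rw [PySem.List.mem_pyRange_one] at hd
      rw [hpred d hd.1 hd.2]
      simp [decide_eq_false (by omega : ¬ d < n2)]
    · rw [List.countP_congr (l := PySem.List.pyRange 1 n1 1)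
        (q := fun d => (PySem.Int.mod n1 d == 0) && (PySem.Int.mod n2 d == 0) && decide (d < n2))
        (by intro d hd; rw [PySem.List.mem_pyRange_one] at hd; rw [hpred d hd.1 hd.2])]
      rw [countP_range_extend _ n2 n1 (by omega) (by omega)
        (by intro d hd _; simp [decide_eq_false (by omega : ¬ d < n2)])]
      apply List.countP_congr
      intro d hd
      rw [PySem.List.mem_pyRange_one] at hd
      rw [decide_eq_true (by omega : d < n2), Bool.and_true]

theorem coprimos_spec_aux (n1 n2 : Int) : coprimos n1 n2 = coprimos_alt n1 n2 := by
  simp only [coprimos, coprimos_alt]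
  rw [PySem.List.foldl_ite_add_one, PySem.List.foldl_if_add_one, count_eq n1 n2]
  set k := (PySem.List.pyRange 1 (min n1 n2) 1).countP
    (fun d => PySem.Int.mod n1 d == 0 && PySem.Int.mod n2 d == 0)
  by_cases h : (0 : Int) + (k : Int) > 1
  · rw [if_pos h]; symm; simp; omega
  · rw [if_neg h]; symm; simp; omega

-- ===== VERDICT (by name: the statement is the Claim_ definition above) =====
theorem coprimos_spec : Claim_equal_coprimos := by
  intro n1 n2 _
  exact coprimos_spec_aux n1 n2
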